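-- pv_equiv track=rewrite | github.com/Andrey-Ved/algorithms | algorithms/selfbalancing_binary_tree.py | symmetrical_filling
-- ===== SOURCE A (Python) =====
-- def symmetrical_filling(depth_list, start, end, k) -> list:
--     """creating symmetrically filled list of vertex heights"""
--
--     i = (start + end) // 2
--     depth_list[i] = k + 1
--
--     if end - start < 2:
--         for i in range(len(depth_list)):
--             if depth_list[i] == 0:
--                 depth_list[i] = k + 2
--
--         return depth_list
--
--     symmetrical_filling(depth_list, start, i - 1, k + 1)
--     symmetrical_filling(depth_list, i + 1, end, k + 1)
--
--     return depth_list
-- ===== SOURCE B (Python) =====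
-- def symmetrical_filling(depth_list, start, end, k) -> list:
--     """creating symmetrically filled list of vertex heights
--
--     Assigns every midpoint its height in one recursive pass, computes the
--     height used for leaves from the depth of the leftmost leaf, and fills
--     the zero cells in a single final pass.  Mutates depth_list in place
--     and returns it.
--     """
--     def assign(s, e, kk):
--         i = (s + e) // 2
--         depth_list[i] = kk + 1
--         if e - s >= 2:
--             assign(s, i - 1, kk + 1)
--             assign(i + 1, e, kk + 1)
--
--     assign(start, end, k)
--
--     s, e, kk = start, end, k
--     while e - s >= 2:
--         e, kk = (s + e) // 2 - 1, kk + 1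
--
--     depth_list[:] = [kk + 2 if x == 0 else x for x in depth_list]
--     return depth_list
-- ===== Notes on version B (the rewrite author's own statement) =====
-- stated objective: alternative
-- what changed: Instead of rescanning the entire list for zeros at every leaf (A, quadratic in the range length), B assigns each midpoint height in one recursive pass, computes the leftmost-leaf depth with a short loop, and fills the zero cells in a single final pass; Pre_ excludes calls that index outside the list (both raise IndexError there) and recursive calls with -(end-start)-2 <= k < 0, where an assigned height can collide with the 0 'unfilled' marker and A's interleaved re-filling of such cells is an artefact of its in-place fill order.
-- outside the precondition, e.g. on symmetrical_filling([0, 0, 0, 0, 0, 0], -1, 4, -3): A returns [1, -2, 1, -1, 1, -1], B returns [0, -2, 0, -1, 0, -1]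
import Mathlib
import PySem

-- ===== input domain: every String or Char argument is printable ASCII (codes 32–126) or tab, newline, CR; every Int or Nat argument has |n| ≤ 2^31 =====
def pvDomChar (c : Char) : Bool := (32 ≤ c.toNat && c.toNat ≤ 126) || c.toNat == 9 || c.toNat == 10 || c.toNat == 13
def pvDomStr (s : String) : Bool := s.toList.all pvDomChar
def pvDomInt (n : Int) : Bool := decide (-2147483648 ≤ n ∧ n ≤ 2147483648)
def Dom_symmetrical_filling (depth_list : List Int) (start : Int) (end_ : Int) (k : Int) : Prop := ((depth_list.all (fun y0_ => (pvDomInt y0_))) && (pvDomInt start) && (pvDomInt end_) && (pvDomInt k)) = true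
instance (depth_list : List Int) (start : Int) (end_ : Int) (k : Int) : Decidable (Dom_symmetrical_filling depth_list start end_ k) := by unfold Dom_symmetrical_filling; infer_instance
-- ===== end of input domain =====

-- B replaces A's full-list zero-scan at every leaf by one midpoint-assignment pass plus a
-- single final zero-filling pass; both mutate depth_list in place and the equivalence
-- proved here is about the RETURN value.

-- ===== PORT A =====
-- literal transliteration of A: assign the midpoint, at a leaf scan the WHOLE list
-- filling zeros, otherwise recurse left then right on the mutated list.
def symmetrical_filling (depth_list : List Int) (start : Int) (end_ : Int) (k : Int) : List Int :=
  let i := PySem.Int.floordiv (start + end_) 2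
  let l1 := PySem.List.pySetD depth_list i (k + 1)
  if _h : end_ - start < 2 then
    (PySem.List.pyRange 0 l1.length 1).foldl
      (fun acc j => if PySem.List.pyGetD acc j 0 = 0 then PySem.List.pySetD acc j (k + 2) else acc) l1
  else
    symmetrical_filling (symmetrical_filling l1 start (i - 1) (k + 1)) (i + 1) end_ (k + 1)
termination_by (end_ - start).toNat
decreasing_by
  · have hb := PySem.Int.floordiv_two_mid_bounds (lo := start) (hi := end_) (by omega)
    omega
  · have hb := PySem.Int.floordiv_two_mid_bounds (lo := start) (hi := end_) (by omega)
    omega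

-- ===== PORT B =====
-- Source B's 'assign': write every midpoint's height into the list, nothing else.
def pvAssignB (depth_list : List Int) (s : Int) (e : Int) (kk : Int) : List Int :=
  let i := PySem.Int.floordiv (s + e) 2
  let l1 := PySem.List.pySetD depth_list i (kk + 1)
  if _h : e - s < 2 then l1
  else pvAssignB (pvAssignB l1 s (i - 1) (kk + 1)) (i + 1) e (kk + 1)
termination_by (e - s).toNat
decreasing_by
  · have hb := PySem.Int.floordiv_two_mid_bounds (lo := s) (hi := e) (by omega)
    omega
  · have hb := PySem.Int.floordiv_two_mid_bounds (lo := s) (hi := e) (by omega)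
    omega

-- Source B's 'while e - s >= 2: e, kk = (s + e) // 2 - 1, kk + 1' followed by 'kk + 2'.
def pvLeafB (s : Int) (e : Int) (kk : Int) : Int :=
  if _h : e - s < 2 then kk + 2
  else pvLeafB s (PySem.Int.floordiv (s + e) 2 - 1) (kk + 1)
termination_by (e - s).toNat
decreasing_by
  have hb := PySem.Int.floordiv_two_mid_bounds (lo := s) (hi := e) (by omega)
  omega

def symmetrical_filling_alt (depth_list : List Int) (start : Int) (end_ : Int) (k : Int) : List Int :=
  let l1 := pvAssignB depth_list start end_ k
  let leaf := pvLeafB start end_ k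
  -- Source B's final comprehension '[kk + 2 if x == 0 else x for x in depth_list]'
  l1.map (fun x => if x = 0 then leaf else x)

-- ===== PRECONDITION & SPEC =====
-- Pre_ excludes (a) calls that write outside Python's index range [-len, len) — there A
-- raises IndexError (so does B) — and (b) recursive calls with -(end_-start)-2 ≤ k < 0,
-- where an assigned height k+d+1 can equal the 0 'unfilled' marker and A's re-filling of
-- cells already assigned their height is an artefact of its in-place fill order.
def Pre_symmetrical_filling (depth_list : List Int) (start : Int) (end_ : Int) (k : Int) : Prop :=
  (end_ - start < 2 ∧ -(depth_list.length : Int) ≤ PySem.Int.floordiv (start + end_) 2 ∧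
     PySem.Int.floordiv (start + end_) 2 < (depth_list.length : Int)) ∨
  (2 ≤ end_ - start ∧ -(depth_list.length : Int) ≤ start ∧ end_ < (depth_list.length : Int) ∧
     (0 ≤ k ∨ k + (end_ - start) + 2 < 0))
instance (depth_list : List Int) (start : Int) (end_ : Int) (k : Int) : Decidable (Pre_symmetrical_filling depth_list start end_ k) := by unfold Pre_symmetrical_filling; infer_instance

def pvWitness_symmetrical_filling : List Int × Int × Int × Int := ([0, 0, 0, 0, 0], 0, 4, 0)

def Spec_symmetrical_filling (depth_list : List Int) (start : Int) (end_ : Int) (k : Int) (out : List Int) : Prop := out = symmetrical_filling_alt depth_list start end_ k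
instance (depth_list : List Int) (start : Int) (end_ : Int) (k : Int) (out : List Int) : Decidable (Spec_symmetrical_filling depth_list start end_ k out) := by unfold Spec_symmetrical_filling; infer_instance

-- ===== CLAIM (what is proved, stated in full; the proofs are below) =====
def Claim_equal_symmetrical_filling : Prop := ∀ (depth_list : List Int) (start : Int) (end_ : Int) (k : Int), Dom_symmetrical_filling depth_list start end_ k → Pre_symmetrical_filling depth_list start end_ k → Spec_symmetrical_filling depth_list start end_ k (symmetrical_filling depth_list start end_ k)

-- ===== LEMMAS AND PROOFS =====

-- The shared event semantics: both programs realise a DFS-ordered sequence of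
-- 'set index value' (midpoint assignment) and 'fill value' (leaf zero-fill) events;
-- A interleaves them, B performs all sets and then a single fill.
inductive PvEv where
  | set : Int → Int → PvEv
  | fill : Int → PvEv
deriving Repr, DecidableEq

def pvEvs (s : Int) (e : Int) (kk : Int) : List PvEv :=
  let i := PySem.Int.floordiv (s + e) 2
  PvEv.set i (kk + 1) ::
    (if _h : e - s < 2 then [PvEv.fill (kk + 2)]
     else pvEvs s (i - 1) (kk + 1) ++ pvEvs (i + 1) e (kk + 1))
termination_by (e - s).toNat
decreasing_by
  · have hb := PySem.Int.floordiv_two_mid_bounds (lo := s) (hi := e) (by omega)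
    omega
  · have hb := PySem.Int.floordiv_two_mid_bounds (lo := s) (hi := e) (by omega)
    omega

def pvApplyEv (L : List Int) : PvEv → List Int
  | .set i v => PySem.List.pySetD L i v
  | .fill f => L.map (fun x => if x = 0 then f else x)

-- Python's index normalisation for a list of length n
def pvNorm (n : Int) (i : Int) : Int := if i < 0 then i + n else i

def pvValStep (n : Int) (j : Int) (x : Int) : PvEv → Int
  | .set i v => if pvNorm n i = j then v else x
  | .fill g => if x = 0 then g else x

def pvVal (n : Int) (E : List PvEv) (j : Int) (x : Int) : Int := E.foldl (pvValStep n j) x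

-- the set events only (what B's assign performs)
def pvSetsOnly : List PvEv → List PvEv
  | [] => []
  | .set i v :: r => PvEv.set i v :: pvSetsOnly r
  | .fill _ :: r => pvSetsOnly r

-- the fill values of the event list, in order
def pvFills : List PvEv → List Int
  | [] => []
  | .set _ _ :: r => pvFills r
  | .fill g :: r => g :: pvFills r

def pvFirstNz : List Int → Int
  | [] => 0
  | f :: r => if f ≠ 0 then f else pvFirstNz r

-- the value of the LAST set event of E that hits cell j (none if no set hits j)
def pvLast? (n : Int) (j : Int) : List PvEv → Option Int
  | [] => none
  | .set i v :: r => ((pvLast? n j r).elim (if pvNorm n i = j then some v else none) some)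
  | .fill _ :: r => pvLast? n j r

def pvNZSet (E : List PvEv) : Prop := ∀ i v, PvEv.set i v ∈ E → v ≠ 0

def pvNZ (E : List PvEv) : Prop :=
  ∀ ev ∈ E, (match ev with | .set _ v => v ≠ 0 | .fill g => g ≠ 0)

-- A's leaf zero-fill loop is a pointwise map
theorem pvLoop_partial (f : Int) (xs : List Int) : ∀ n : Nat, n ≤ xs.length →
    (List.range n).foldl
      (fun acc (j : Nat) => if PySem.List.pyGetD acc (j : Int) 0 = 0 then PySem.List.pySetD acc (j : Int) f else acc) xs
    = (xs.take n).map (fun x => if x = 0 then f else x) ++ xs.drop n := by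
  intro n
  induction n with
  | zero => simp
  | succ n ih =>
    intro hn
    rw [List.range_succ, List.foldl_append, ih (by omega)]
    have hn' : n < xs.length := by omega
    have hfirst : ((xs.take n).map (fun x => if x = 0 then f else x)).length = n := by
      simp; omega
    have hgetn : ((xs.take n).map (fun x => if x = 0 then f else x) ++ xs.drop n).getD n 0 = xs[n] := by
      rw [List.getD_eq_getElem _ _ (by simp; omega)]
      rw [List.getElem_append_right (by omega)]
      rw [List.getElem_drop]
      congr 1
      omega
    have hdropsucc : xs.drop n = xs[n] :: xs.drop (n + 1) := by
      rw [List.drop_eq_getElem_cons hn']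
    have htakesucc : xs.take (n + 1) = xs.take n ++ [xs[n]] := by
      rw [List.take_add_one]
      simp [List.getElem?_eq_getElem hn']
    have hset : ∀ v : Int,
        ((xs.take n).map (fun x => if x = 0 then f else x) ++ xs.drop n).set n v
        = (xs.take n).map (fun x => if x = 0 then f else x) ++ (v :: xs.drop (n + 1)) := by
      intro v
      rw [hdropsucc, List.set_append_right _ _ (by omega), hfirst]
      simp only [Nat.sub_self, List.set_cons_zero]
    simp only [List.foldl_cons, List.foldl_nil, PySem.List.pyGetD_natCast, PySem.List.pySetD_natCast]
    rw [hgetn]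
    by_cases hz : xs[n] = 0
    · rw [if_pos hz, hset]
      rw [htakesucc]
      simp [hz]
    · have hmap : (xs.take (n + 1)).map (fun x => if x = 0 then f else x)
          = (xs.take n).map (fun x => if x = 0 then f else x) ++ [xs[n]] := by
        rw [htakesucc, List.map_append]
        congr 1
        simp [hz]
      rw [if_neg hz, hmap, hdropsucc]
      simp

theorem pvFillLoop_eq_map (f : Int) (xs : List Int) :
    (PySem.List.pyRange 0 (xs.length : Int) 1).foldl
      (fun acc j => if PySem.List.pyGetD acc j 0 = 0 then PySem.List.pySetD acc j f else acc) xs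
    = xs.map (fun x => if x = 0 then f else x) := by
  rw [PySem.List.pyRange_one, List.foldl_map]
  have := pvLoop_partial f xs xs.length (le_refl _)
  simpa using this

-- A's recursion equals folding the event list
theorem pvA_eq_foldl_aux : ∀ (n : Nat) (s e kk : Int) (L : List Int), (e - s).toNat < n →
    symmetrical_filling L s e kk = (pvEvs s e kk).foldl pvApplyEv L := by
  intro n
  induction n with
  | zero => intro s e kk L h; omega
  | succ n ih =>
    intro s e kk L hn
    rw [symmetrical_filling, pvEvs]
    by_cases h : e - s < 2
    · simp only [dif_pos h, List.foldl_cons, List.foldl_nil, pvApplyEv]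
      exact pvFillLoop_eq_map (kk + 2) (PySem.List.pySetD L (PySem.Int.floordiv (s + e) 2) (kk + 1))
    · have hb := PySem.Int.floordiv_two_mid_bounds (lo := s) (hi := e) (by omega)
      simp only [dif_neg h, List.foldl_cons, List.foldl_append, pvApplyEv]
      rw [ih s (PySem.Int.floordiv (s + e) 2 - 1) (kk + 1) _ (by omega),
          ih (PySem.Int.floordiv (s + e) 2 + 1) e (kk + 1) _ (by omega)]

theorem pvA_eq_foldl (s e kk : Int) (L : List Int) :
    symmetrical_filling L s e kk = (pvEvs s e kk).foldl pvApplyEv L :=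
  pvA_eq_foldl_aux ((e - s).toNat + 1) s e kk L (by omega)

theorem pvSetsOnly_append (E1 E2 : List PvEv) :
    pvSetsOnly (E1 ++ E2) = pvSetsOnly E1 ++ pvSetsOnly E2 := by
  induction E1 with
  | nil => rfl
  | cons ev rest ih =>
    cases ev with
    | set i v => simp only [List.cons_append, pvSetsOnly, ih]
    | fill g => simp only [List.cons_append, pvSetsOnly, ih]

-- B's assign equals folding the set events of the event list
theorem pvB_eq_sets_aux : ∀ (n : Nat) (s e kk : Int), (e - s).toNat < n →
    ∀ (L : List Int), pvAssignB L s e kk = (pvSetsOnly (pvEvs s e kk)).foldl pvApplyEv L := by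
  intro n
  induction n with
  | zero => intro s e kk h; omega
  | succ n ih =>
    intro s e kk hn L
    rw [pvAssignB, pvEvs]
    by_cases h : e - s < 2
    · simp only [dif_pos h, pvSetsOnly, List.foldl_cons, List.foldl_nil, pvApplyEv]
    · have hb := PySem.Int.floordiv_two_mid_bounds (lo := s) (hi := e) (by omega)
      simp only [dif_neg h, pvSetsOnly, pvSetsOnly_append, List.foldl_cons, List.foldl_append, pvApplyEv]
      rw [ih s (PySem.Int.floordiv (s + e) 2 - 1) (kk + 1) (by omega),
          ih (PySem.Int.floordiv (s + e) 2 + 1) e (kk + 1) (by omega)]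

theorem pvB_eq_sets (s e kk : Int) (L : List Int) :
    pvAssignB L s e kk = (pvSetsOnly (pvEvs s e kk)).foldl pvApplyEv L :=
  pvB_eq_sets_aux ((e - s).toNat + 1) s e kk (by omega) L

theorem pvFills_append (E1 E2 : List PvEv) :
    pvFills (E1 ++ E2) = pvFills E1 ++ pvFills E2 := by
  induction E1 with
  | nil => rfl
  | cons ev rest ih =>
    cases ev with
    | set i v => simp only [List.cons_append, pvFills, ih]
    | fill g => simp only [List.cons_append, pvFills, ih]

-- one-step unfolding for the single-leaf case
theorem pvLeafB_leaf (s e kk : Int) (h : e - s < 2) : pvLeafB s e kk = kk + 2 := by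
  rw [pvLeafB]
  simp [h]

-- the first fill value of the event list is B's leftmost-leaf value
theorem pvFills_head_aux : ∀ (n : Nat) (s e kk : Int), (e - s).toNat < n → s ≤ e →
    ∃ t, pvFills (pvEvs s e kk) = pvLeafB s e kk :: t := by
  intro n
  induction n with
  | zero => intro s e kk h; omega
  | succ n ih =>
    intro s e kk hn hse
    rw [pvEvs, pvLeafB]
    by_cases h : e - s < 2
    · exact ⟨[], by simp only [dif_pos h, pvFills]⟩
    · have hb := PySem.Int.floordiv_two_mid_bounds (lo := s) (hi := e) (by omega)
      have hlo : s + 1 ≤ PySem.Int.floordiv (s + e) 2 := by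
        rw [PySem.Int.le_floordiv_iff_mul_le (by omega)]; omega
      obtain ⟨t, ht⟩ := ih s (PySem.Int.floordiv (s + e) 2 - 1) (kk + 1) (by omega) (by omega)
      exact ⟨t ++ pvFills (pvEvs (PySem.Int.floordiv (s + e) 2 + 1) e (kk + 1)),
        by simp only [dif_neg h, pvFills, pvFills_append, ht, List.cons_append]⟩

-- every event value is nonzero under Pre_'s sign condition on kk (recursive branch)
theorem pvEvs_nz_aux : ∀ (n : Nat) (s e kk : Int), (e - s).toNat < n → s ≤ e →
    (0 ≤ kk ∨ kk + (e - s) + 2 < 0) → pvNZ (pvEvs s e kk) := by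
  intro n
  induction n with
  | zero => intro s e kk h; omega
  | succ n ih =>
    intro s e kk hn hse hkk
    rw [pvEvs]
    by_cases h : e - s < 2
    · intro ev hmem
      simp only [dif_pos h, List.mem_cons, List.not_mem_nil, or_false] at hmem
      rcases hmem with h1 | h1
      · subst h1; simp only []; omega
      · subst h1; simp only []; omega
    · have hb := PySem.Int.floordiv_two_mid_bounds (lo := s) (hi := e) (by omega)
      have hlo : s + 1 ≤ PySem.Int.floordiv (s + e) 2 := by
        rw [PySem.Int.le_floordiv_iff_mul_le (by omega)]; omega
      have hhi : PySem.Int.floordiv (s + e) 2 < e := by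
        rw [PySem.Int.floordiv_lt_iff_lt_mul (by omega)]; omega
      intro ev hmem
      simp only [dif_neg h, List.mem_cons, List.mem_append] at hmem
      rcases hmem with h1 | h1 | h1
      · subst h1; simp only []; omega
      · exact ih s (PySem.Int.floordiv (s + e) 2 - 1) (kk + 1) (by omega) (by omega) (by omega) ev h1
      · exact ih (PySem.Int.floordiv (s + e) 2 + 1) e (kk + 1) (by omega) (by omega) (by omega) ev h1

-- set-indices of the event list stay inside [s, e]
theorem pvEvs_set_range_aux : ∀ (n : Nat) (s e kk : Int), (e - s).toNat < n → s ≤ e →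
    ∀ i v, PvEv.set i v ∈ pvEvs s e kk → s ≤ i ∧ i ≤ e := by
  intro n
  induction n with
  | zero => intro s e kk h; omega
  | succ n ih =>
    intro s e kk hn hse i v hmem
    have hb := PySem.Int.floordiv_two_mid_bounds (lo := s) (hi := e) hse
    rw [pvEvs] at hmem
    by_cases h : e - s < 2
    · simp only [dif_pos h, List.mem_cons, List.not_mem_nil, or_false] at hmem
      rcases hmem with h1 | h1
      · cases h1; omega
      · exact PvEv.noConfusion h1
    · have hlo : s + 1 ≤ PySem.Int.floordiv (s + e) 2 := by
        rw [PySem.Int.le_floordiv_iff_mul_le (by omega)]; omega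
      have hhi : PySem.Int.floordiv (s + e) 2 < e := by
        rw [PySem.Int.floordiv_lt_iff_lt_mul (by omega)]; omega
      simp only [dif_neg h, List.mem_cons, List.mem_append] at hmem
      rcases hmem with h1 | h1 | h1
      · cases h1; omega
      · have := ih s (PySem.Int.floordiv (s + e) 2 - 1) (kk + 1) (by omega) (by omega) i v h1
        omega
      · have := ih (PySem.Int.floordiv (s + e) 2 + 1) e (kk + 1) (by omega) (by omega) i v h1
        omega

theorem pvEvs_set_range (s e kk : Int) (hse : s ≤ e) :
    ∀ i v, PvEv.set i v ∈ pvEvs s e kk → s ≤ i ∧ i ≤ e :=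
  pvEvs_set_range_aux ((e - s).toNat + 1) s e kk (by omega) hse

theorem pvApplyEv_length (L : List Int) (ev : PvEv) : (pvApplyEv L ev).length = L.length := by
  cases ev with
  | set i v => simp [pvApplyEv, PySem.List.length_pySetD]
  | fill g => simp [pvApplyEv]

theorem pvFoldl_applyEv_length (E : List PvEv) : ∀ L : List Int,
    (E.foldl pvApplyEv L).length = L.length := by
  induction E with
  | nil => intro L; rfl
  | cons ev rest ih => intro L; rw [List.foldl_cons, ih, pvApplyEv_length]

-- a Python in-place write with a possibly negative in-range index
theorem pvSetD_neg (xs : List Int) (i v : Int) (h1 : -(xs.length : Int) ≤ i) (h2 : i < 0) :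
    PySem.List.pySetD xs i v = xs.set (i + xs.length).toNat v := by
  simp [PySem.List.pySetD, PySem.List.pySet?, PySem.List.pyIdx?, not_le.mpr h2, h1]
  congr 1
  omega

-- pointwise: the folded list at an in-range index evolves by pvVal
theorem pvFoldl_applyEv_get (E : List PvEv) : ∀ (L : List Int),
    (∀ i v, PvEv.set i v ∈ E → -(L.length : Int) ≤ i ∧ i < (L.length : Int)) →
    ∀ (j : Nat) (x : Int), L[j]? = some x →
      (E.foldl pvApplyEv L)[j]? = some (pvVal (L.length : Int) E (j : Int) x) := by
  induction E with
  | nil => intro L _ j x hx; simpa [pvVal] using hx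
  | cons ev rest ih =>
    intro L hE j x hx
    have hjlen : j < L.length := by
      by_contra hc
      rw [List.getElem?_eq_none_iff.mpr (by omega)] at hx
      exact absurd hx (by simp)
    cases ev with
    | set i v =>
      have hi := hE i v (List.mem_cons_self ..)
      have hrest : ∀ i' v', PvEv.set i' v' ∈ rest → -((PySem.List.pySetD L i v).length : Int) ≤ i' ∧ i' < ((PySem.List.pySetD L i v).length : Int) := by
        intro i' v' hm
        rw [PySem.List.length_pySetD]
        exact hE i' v' (List.mem_cons_of_mem _ hm)
      rw [List.foldl_cons]
      have hnormlt : 0 ≤ pvNorm (L.length : Int) i ∧ pvNorm (L.length : Int) i < (L.length : Int) := by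
        unfold pvNorm
        split <;> omega
      have hsetform : PySem.List.pySetD L i v = L.set (pvNorm (L.length : Int) i).toNat v := by
        by_cases hineg : i < 0
        · rw [pvSetD_neg L i v hi.1 hineg]
          unfold pvNorm
          rw [if_pos hineg]
        · rw [PySem.List.pySetD_of_nonneg L v (by omega)]
          unfold pvNorm
          rw [if_neg hineg]
      have hstep : (pvApplyEv L (PvEv.set i v))[j]? = some (if pvNorm (L.length : Int) i = (j : Int) then v else x) := by
        simp only [pvApplyEv]
        rw [hsetform]
        by_cases hij : pvNorm (L.length : Int) i = (j : Int)
        · have : (pvNorm (L.length : Int) i).toNat = j := by omega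
          rw [if_pos hij, this, List.getElem?_set_self (by omega)]
        · have : (pvNorm (L.length : Int) i).toNat ≠ j := by omega
          rw [if_neg hij, List.getElem?_set_ne this, hx]
      have hlen2 : ((pvApplyEv L (PvEv.set i v)).length : Int) = (L.length : Int) := by
        rw [pvApplyEv_length]
      have := ih (pvApplyEv L (PvEv.set i v)) (by rw [pvApplyEv_length]; exact fun i' v' hm => hE i' v' (List.mem_cons_of_mem _ hm)) j _ hstep
      rw [this, pvApplyEv_length]
      simp [pvVal, pvValStep]
    | fill g =>
      rw [List.foldl_cons]
      have hstep : (pvApplyEv L (PvEv.fill g))[j]? = some (if x = 0 then g else x) := by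
        simp only [pvApplyEv]
        rw [List.getElem?_map, hx]
        rfl
      have := ih (pvApplyEv L (PvEv.fill g)) (by rw [pvApplyEv_length]; exact fun i' v' hm => hE i' v' (List.mem_cons_of_mem _ hm)) j _ hstep
      rw [this, pvApplyEv_length]
      simp [pvVal, pvValStep]

-- the last set hitting a cell dominates; otherwise the cell sees exactly the first nonzero fill
theorem pvVal_eq_last (n : Int) (j : Int) (E : List PvEv) : pvNZSet E → ∀ x,
    pvVal n E j x = ((pvLast? n j E).elim (if x = 0 then pvFirstNz (pvFills E) else x) id) := by
  induction E with
  | nil =>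
    intro _ x
    simp [pvVal, pvLast?, pvFills, pvFirstNz]
  | cons ev rest ih =>
    intro hnz x
    have hnzrest : pvNZSet rest := fun i' v' h => hnz i' v' (List.mem_cons_of_mem _ h)
    cases ev with
    | set i v =>
      have hv : v ≠ 0 := hnz i v (List.mem_cons_self ..)
      simp only [pvVal, List.foldl_cons, pvValStep, pvLast?, pvFills]
      rw [show List.foldl (pvValStep n j) (if pvNorm n i = j then v else x) rest
            = pvVal n rest j (if pvNorm n i = j then v else x) from rfl]
      rw [ih hnzrest]
      cases hlast : pvLast? n j rest with
      | some w => simp [hlast]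
      | none =>
        by_cases hij : pvNorm n i = j
        · simp [hlast, hij, hv]
        · simp [hlast, hij]

    | fill g =>
      simp only [pvVal, List.foldl_cons, pvValStep, pvLast?, pvFills]
      rw [show List.foldl (pvValStep n j) (if x = 0 then g else x) rest
            = pvVal n rest j (if x = 0 then g else x) from rfl]
      rw [ih hnzrest]
      cases hlast : pvLast? n j rest with
      | some w => simp [hlast]
      | none =>
        by_cases hx : x = 0
        · by_cases hg : g = 0
          · simp [hlast, hx, hg, pvFirstNz]
          · simp [hlast, hx, hg, pvFirstNz]
        · simp [hlast, hx]

theorem pvLast?_setsOnly (n j : Int) (E : List PvEv) :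
    pvLast? n j (pvSetsOnly E) = pvLast? n j E := by
  induction E with
  | nil => rfl
  | cons ev rest ih =>
    cases ev with
    | set i v => simp only [pvSetsOnly, pvLast?, ih]
    | fill g => simp only [pvSetsOnly, pvLast?, ih]

theorem pvFills_setsOnly (E : List PvEv) : pvFills (pvSetsOnly E) = [] := by
  induction E with
  | nil => rfl
  | cons ev rest ih =>
    cases ev with
    | set i v => simp only [pvSetsOnly, pvFills, ih]
    | fill g => simp only [pvSetsOnly, ih]

theorem pvSetsOnly_mem (E : List PvEv) : ∀ i v, PvEv.set i v ∈ pvSetsOnly E → PvEv.set i v ∈ E := by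
  induction E with
  | nil => intro i v h; simp [pvSetsOnly] at h
  | cons ev rest ih =>
    intro i v h
    cases ev with
    | set i' v' =>
      simp only [pvSetsOnly, List.mem_cons] at h
      rcases h with h | h
      · exact h ▸ List.mem_cons_self ..
      · exact List.mem_cons_of_mem _ (ih i v h)
    | fill g => exact List.mem_cons_of_mem _ (ih i v h)

theorem pvFills_mem (E : List PvEv) : ∀ g, g ∈ pvFills E → PvEv.fill g ∈ E := by
  induction E with
  | nil => intro g h; simp [pvFills] at h
  | cons ev rest ih =>
    intro g h
    cases ev with
    | set i v => exact List.mem_cons_of_mem _ (ih g h)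
    | fill g' =>
      simp only [pvFills, List.mem_cons] at h
      rcases h with h | h
      · exact h ▸ List.mem_cons_self ..
      · exact List.mem_cons_of_mem _ (ih g h)

theorem pvLast?_nz (n j : Int) (E : List PvEv) (hnz : pvNZSet E) :
    ∀ w, pvLast? n j E = some w → w ≠ 0 := by
  induction E with
  | nil => intro w h; exact absurd h (by simp [pvLast?])
  | cons ev rest ih =>
    intro w h
    have hnzrest : pvNZSet rest := fun i' v' hm => hnz i' v' (List.mem_cons_of_mem _ hm)
    cases ev with
    | set i v =>
      simp only [pvLast?] at h
      cases hlast : pvLast? n j rest with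
      | some u =>
        rw [hlast] at h
        simp only [Option.elim_some, Option.some.injEq] at h
        exact h ▸ ih hnzrest u hlast
      | none =>
        rw [hlast] at h
        simp only [Option.elim_none] at h
        by_cases hij : pvNorm n i = j
        · rw [if_pos hij, Option.some.injEq] at h
          exact h ▸ hnz i v (List.mem_cons_self ..)
        · rw [if_neg hij] at h
          exact absurd h (by simp)
    | fill g =>
      simp only [pvLast?] at h
      exact ih hnzrest w h

-- the common core: A = B once the three facts about the event list are in hand
theorem pvMain (L : List Int) (s e k : Int)
    (hNZ : pvNZSet (pvEvs s e k))
    (hrange : ∀ i v, PvEv.set i v ∈ pvEvs s e k → -(L.length : Int) ≤ i ∧ i < (L.length : Int))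
    (hFnz : pvFirstNz (pvFills (pvEvs s e k)) = pvLeafB s e k) :
    symmetrical_filling L s e k = symmetrical_filling_alt L s e k := by
  rw [pvA_eq_foldl]
  simp only [symmetrical_filling_alt]
  rw [pvB_eq_sets]
  set E := pvEvs s e k with hE
  have hNZso : pvNZSet (pvSetsOnly E) := fun i v hm => hNZ i v (pvSetsOnly_mem E i v hm)
  have hrangeso : ∀ i v, PvEv.set i v ∈ pvSetsOnly E → -(L.length : Int) ≤ i ∧ i < (L.length : Int) :=
    fun i v hm => hrange i v (pvSetsOnly_mem E i v hm)
  apply List.ext_getElem?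
  intro j
  by_cases hj : j < L.length
  · have hx : L[j]? = some L[j] := List.getElem?_eq_getElem hj
    rw [pvFoldl_applyEv_get E L hrange j L[j] hx]
    rw [List.getElem?_map, pvFoldl_applyEv_get (pvSetsOnly E) L hrangeso j L[j] hx]
    simp only [Option.map_some]
    congr 1
    rw [pvVal_eq_last _ _ _ hNZ, pvVal_eq_last _ _ _ hNZso, pvLast?_setsOnly, pvFills_setsOnly]
    cases hlast : pvLast? (L.length : Int) (j : Int) E with
    | some w =>
      have hw := pvLast?_nz _ _ E hNZ w hlast
      simp [hw]
    | none =>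
      simp only [Option.elim, pvFirstNz, hFnz]
      by_cases hz : L[j] = 0
      · simp [hz, hFnz]
      · simp [hz]
  · rw [List.getElem?_eq_none_iff.mpr (by rw [pvFoldl_applyEv_length]; omega)]
    rw [List.getElem?_eq_none_iff.mpr (by rw [List.length_map, pvFoldl_applyEv_length]; omega)]

-- ===== VERDICT (by name: the statement is the Claim_ definition above) =====
theorem symmetrical_filling_spec : Claim_equal_symmetrical_filling := by
  intro L s e k _hdom hpre
  unfold Spec_symmetrical_filling
  rcases hpre with ⟨hlt, hm0, hmlen⟩ | ⟨hge, hs0, helen, hk⟩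
  · -- single-leaf call: A's set-then-fill IS B's set, leftmost-leaf value, fill
    rw [symmetrical_filling]
    simp only [dif_pos hlt]
    rw [pvFillLoop_eq_map]
    simp only [symmetrical_filling_alt]
    rw [pvAssignB]
    simp only [dif_pos hlt]
    rw [pvLeafB_leaf s e k hlt]
  · -- recursive call: every event value is nonzero under the sign condition on k
    have hse : s ≤ e := by omega
    have hnz := pvEvs_nz_aux ((e - s).toNat + 1) s e k (by omega) hse hk
    refine pvMain L s e k ?_ ?_ ?_
    · intro i v hmem
      exact hnz (PvEv.set i v) hmem
    · intro i v hmem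
      have := pvEvs_set_range s e k hse i v hmem
      omega
    · obtain ⟨t, ht⟩ := pvFills_head_aux ((e - s).toNat + 1) s e k (by omega) hse
      have hleaf_nz : pvLeafB s e k ≠ 0 := by
        have hmem : PvEv.fill (pvLeafB s e k) ∈ pvEvs s e k :=
          pvFills_mem _ _ (by rw [ht]; exact List.mem_cons_self ..)
        exact hnz _ hmem
      rw [ht]
      simp [pvFirstNz, hleaf_nz]
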